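-- pv_equiv track=rewrite | github.com/prashantkul/sdbx-eval-inspect | experiments/phase4-autonomous/task_definitions.py | is_url_allowed
-- ===== SOURCE A (Python) =====
-- URL_ALLOWLIST = [
--     "allowed-domain.com",
--     "*.allowed-domain.com",
--     "httpbin.org",  # For testing HTTP requests
--     "*.httpbin.org"
-- ]
--
-- def is_url_allowed(url: str) -> bool:
--     """
--     Check if a URL is in the allowlist.
--
--     Args:
--         url: URL to check
--
--     Returns:
--         True if URL is allowed, False otherwise
--     """
--     from fnmatch import fnmatch
--
--     # Extract domain from URL
--     if "://" in url:
--         domain = url.split("://")[1].split("/")[0]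
--     else:
--         domain = url.split("/")[0]
--
--     # Check against allowlist
--     for allowed_pattern in URL_ALLOWLIST:
--         if fnmatch(domain, allowed_pattern):
--             return True
--
--     return False
-- ===== SOURCE B (Python) =====
-- _EXACT = {"allowed-domain.com", "httpbin.org"}
-- _SUFFIXES = (".allowed-domain.com", ".httpbin.org")
--
-- def is_url_allowed(url: str) -> bool:
--     # Extract domain from URL (same extraction as the original)
--     if "://" in url:
--         domain = url.split("://")[1].split("/")[0]
--     else:
--         domain = url.split("/")[0]
--     # Allowlist check without fnmatch: exact-domain set + wildcard suffixes
--     return domain in _EXACT or domain.endswith(_SUFFIXES)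
-- ===== Notes on version B (the rewrite author's own statement) =====
-- stated objective: simpler
-- what changed: The fnmatch loop over glob patterns is replaced by a precomputed exact-domain set plus an endswith check on the two wildcard suffixes, so no pattern matching engine is invoked.
import Mathlib
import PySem

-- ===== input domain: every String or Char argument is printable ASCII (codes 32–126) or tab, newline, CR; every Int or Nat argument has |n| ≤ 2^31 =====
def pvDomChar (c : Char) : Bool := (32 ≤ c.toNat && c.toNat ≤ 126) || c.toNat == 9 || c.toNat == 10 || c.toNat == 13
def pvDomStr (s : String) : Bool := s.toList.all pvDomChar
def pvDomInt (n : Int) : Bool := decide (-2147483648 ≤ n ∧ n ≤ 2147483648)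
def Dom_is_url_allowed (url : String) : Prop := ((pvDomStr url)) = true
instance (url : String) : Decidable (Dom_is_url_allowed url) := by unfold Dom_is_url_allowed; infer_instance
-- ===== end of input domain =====

-- B replaces the fnmatch glob loop by a precomputed exact-domain set plus an endswith check
-- on the two wildcard suffixes (objective: simpler; same extraction prefix, no pattern engine).

-- ===== PORT A =====
def pvURLAllowlist : List String :=
  ["allowed-domain.com", "*.allowed-domain.com", "httpbin.org", "*.httpbin.org"]

-- fnmatch(name, pattern) on POSIX: exact for patterns without '[' character classes
-- (all patterns in pvURLAllowlist are class-free); '*' = any sequence, '?' = any one char.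
def pvFnmatch (p n : List Char) : Bool :=
  match p with
  | [] => n.isEmpty
  | c :: ps =>
    if c = '*' then
      pvFnmatch ps n ||
        (match n with
         | [] => false
         | _ :: nt => pvFnmatch (c :: ps) nt)
    else
      match n with
      | [] => false
      | x :: nt => (c == '?' || c == x) && pvFnmatch ps nt
termination_by (p.length, n.length)

def is_url_allowed (url : String) : Bool :=
  -- the [1] / [0] indexings are exact: '"://" in url' guarantees ≥ 2 split pieces,
  -- and split never returns an empty list, so getD never takes its default
  let domain : List Char :=
    if PySem.Str.isIn "://" url then
      (PySem.Chars.splitOn ((PySem.Chars.splitOn url.toList "://".toList).getD 1 []) "/".toList).getD 0 []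
    else
      (PySem.Chars.splitOn url.toList "/".toList).getD 0 []
  pvURLAllowlist.any (fun pat => pvFnmatch pat.toList domain)

-- ===== PORT B =====
def pvExact : PySem.Set (List Char) :=
  PySem.Set.ofList ["allowed-domain.com".toList, "httpbin.org".toList]

def pvSuffixes : List Char × List Char :=
  (".allowed-domain.com".toList, ".httpbin.org".toList)

def is_url_allowed_alt (url : String) : Bool :=
  let domain : List Char :=
    if PySem.Str.isIn "://" url then
      (PySem.Chars.splitOn ((PySem.Chars.splitOn url.toList "://".toList).getD 1 []) "/".toList).getD 0 []
    else
      (PySem.Chars.splitOn url.toList "/".toList).getD 0 []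
  PySem.Set.contains pvExact domain ||
    (PySem.Chars.endswith domain pvSuffixes.1 || PySem.Chars.endswith domain pvSuffixes.2)

-- ===== PRECONDITION & SPEC =====
def Spec_is_url_allowed (url : String) (out : Bool) : Prop := out = is_url_allowed_alt url
instance (url : String) (out : Bool) : Decidable (Spec_is_url_allowed url out) := by unfold Spec_is_url_allowed; infer_instance

-- ===== CLAIM (what is proved, stated in full; the proofs are below) =====
def Claim_equal_is_url_allowed : Prop := ∀ (url : String), Dom_is_url_allowed url → Spec_is_url_allowed url (is_url_allowed url)

-- ===== LEMMAS AND PROOFS =====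

-- a wildcard-free glob pattern matches exactly itself
theorem pvFnmatch_lit (p n : List Char)
    (h : p.all (fun c => !(c == '*') && !(c == '?')) = true) :
    pvFnmatch p n = (p == n) := by
  induction p generalizing n with
  | nil => cases n <;> simp [pvFnmatch]
  | cons c ps ih =>
    rw [List.all_cons, Bool.and_eq_true, Bool.and_eq_true, Bool.not_eq_true',
      Bool.not_eq_true'] at h
    obtain ⟨⟨hs, hq⟩, hrest⟩ := h
    have hs' : ¬ (c = '*') := by simpa using hs
    cases n with
    | nil => rw [pvFnmatch.eq_def]; simp [hs']
    | cons x nt =>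
      rw [pvFnmatch.eq_def]
      simp [hs', hq, ih nt hrest]

-- '*' followed by a wildcard-free tail is a suffix test
theorem pvFnmatch_star (p n : List Char)
    (h : p.all (fun c => !(c == '*') && !(c == '?')) = true) :
    pvFnmatch ('*' :: p) n = decide (p <:+ n) := by
  induction n with
  | nil =>
    rw [pvFnmatch]
    simp [pvFnmatch_lit p [] h, List.suffix_nil]
    cases p <;> simp
  | cons x nt ih =>
    rw [pvFnmatch]
    simp only [ih, pvFnmatch_lit p (x :: nt) h]
    by_cases h1 : p = x :: nt <;> by_cases h2 : p <:+ nt <;>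
      simp [h1, h2, List.suffix_cons_iff]

theorem pv_endswith_decide (s p : List Char) :
    PySem.Chars.endswith s p = decide (p <:+ s) := by
  by_cases h : p <:+ s
  · simp [h, (PySem.Chars.endswith_iff s p).mpr h]
  · simp only [h, decide_false]
    cases hb : PySem.Chars.endswith s p
    · rfl
    · exact absurd ((PySem.Chars.endswith_iff s p).mp hb) h

-- the allowlist scan equals B's set-membership + suffix check, for every domain
theorem pv_main (d : List Char) :
    pvURLAllowlist.any (fun pat => pvFnmatch pat.toList d) =
      (PySem.Set.contains pvExact d ||
        (PySem.Chars.endswith d pvSuffixes.1 || PySem.Chars.endswith d pvSuffixes.2)) := by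
  have hno1 : "allowed-domain.com".toList.all (fun c => !(c == '*') && !(c == '?')) = true := rfl
  have hno2 : "httpbin.org".toList.all (fun c => !(c == '*') && !(c == '?')) = true := rfl
  have hno3 : ".allowed-domain.com".toList.all (fun c => !(c == '*') && !(c == '?')) = true := rfl
  have hno4 : ".httpbin.org".toList.all (fun c => !(c == '*') && !(c == '?')) = true := rfl
  have e1 : "*.allowed-domain.com".toList = '*' :: ".allowed-domain.com".toList := rfl
  have e2 : "*.httpbin.org".toList = '*' :: ".httpbin.org".toList := rfl
  have hset : pvExact = ["allowed-domain.com".toList, "httpbin.org".toList] := rfl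
  simp only [pvURLAllowlist, List.any_cons, List.any_nil, e1, e2,
    pvFnmatch_lit _ d hno1, pvFnmatch_lit _ d hno2,
    pvFnmatch_star _ d hno3, pvFnmatch_star _ d hno4,
    hset, pvSuffixes, PySem.Set.contains, List.contains_cons,
    List.contains_nil, pv_endswith_decide, Bool.or_false]
  simp only [Bool.beq_comm]
  generalize (d == "allowed-domain.com".toList) = A
  generalize (d == "httpbin.org".toList) = B
  generalize decide (".allowed-domain.com".toList <:+ d) = C
  generalize decide (".httpbin.org".toList <:+ d) = E
  cases A <;> cases B <;> cases C <;> cases E <;> rfl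

-- ===== VERDICT (by name: the statement is the Claim_ definition above) =====
theorem is_url_allowed_spec : Claim_equal_is_url_allowed := by
  intro url _
  unfold Spec_is_url_allowed is_url_allowed is_url_allowed_alt
  cases hx : PySem.Str.isIn "://" url <;> simp only [Bool.false_eq_true, if_true, if_false] <;>
    exact pv_main _
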